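-- pv_equiv track=rewrite | github.com/UKGovernmentBEIS/inspect_ai | src/inspect_ai/log/_pool.py | _compress_refs
-- ===== SOURCE A (Python) =====
-- def _compress_refs(indices: list[int]) -> list[tuple[int, int]]:
--     """Compress contiguous int indices into range-encoded refs.
--
--     Every element is a ``(start, end_exclusive)`` range pair.
--
--     Examples::
--
--         [0,1,2,3]   -> [(0,4)]
--         [0,3,4,5,9] -> [(0,1),(3,6),(9,10)]
--         [2,5,8]     -> [(2,3),(5,6),(8,9)]
--         [3,4]       -> [(3,5)]
--     """
--     if not indices:
--         return []
--     result: list[tuple[int, int]] = []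
--     start = indices[0]
--     end_exclusive = start + 1
--     for i in indices[1:]:
--         if i == end_exclusive:
--             end_exclusive += 1
--         else:
--             result.append((start, end_exclusive))
--             start = i
--             end_exclusive = i + 1
--     result.append((start, end_exclusive))
--     return result
-- ===== SOURCE B (Python) =====
-- def _compress_refs(indices: list[int]) -> list[tuple[int, int]]:
--     """Compress contiguous int indices into range-encoded refs.
--
--     Backward scan: walk the indices from the end; each index either extends
--     the most recently built range downward (when that range starts at i+1)
--     or opens a new singleton range. Ranges are built newest-first and the
--     list is reversed once at the end.
--     """
--     rev: list[tuple[int, int]] = []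
--     for i in reversed(indices):
--         if rev and rev[-1][0] == i + 1:
--             rev[-1] = (i, rev[-1][1])
--         else:
--             rev.append((i, i + 1))
--     rev.reverse()
--     return rev
-- ===== Notes on version B (the rewrite author's own statement) =====
-- stated objective: alternative
-- what changed: Replaces A's forward start/end_exclusive state machine with a backward scan that either extends the most recently built range downward or opens a new singleton, building the result newest-first and reversing once.
import Mathlib
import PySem

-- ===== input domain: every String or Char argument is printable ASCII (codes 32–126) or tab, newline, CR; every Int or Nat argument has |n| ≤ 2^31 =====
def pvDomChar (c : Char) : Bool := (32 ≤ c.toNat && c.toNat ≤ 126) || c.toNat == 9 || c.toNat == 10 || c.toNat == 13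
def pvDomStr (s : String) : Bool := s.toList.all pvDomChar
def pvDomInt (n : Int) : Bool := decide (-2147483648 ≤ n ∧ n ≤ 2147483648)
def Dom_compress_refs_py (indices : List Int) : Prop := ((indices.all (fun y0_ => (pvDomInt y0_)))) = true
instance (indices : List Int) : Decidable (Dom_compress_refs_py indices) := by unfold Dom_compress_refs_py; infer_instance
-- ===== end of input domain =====

-- B replaces A's forward start/end_exclusive state machine by a backward scan that extends
-- the most recent range downward or opens a new singleton (objective: alternative, same cost).

-- ===== PORT A =====
-- loop body of A: state (result, start, end_exclusive)
def pvStepA (acc : List (Int × Int) × Int × Int) (i : Int) : List (Int × Int) × Int × Int :=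
  if i = acc.2.2 then (acc.1, acc.2.1, acc.2.2 + 1)
  else (acc.1 ++ [(acc.2.1, acc.2.2)], i, i + 1)

def compress_refs_py (indices : List Int) : List (Int × Int) :=
  match indices with
  | [] => []
  | x :: rest =>
    let st := rest.foldl pvStepA ([], x, x + 1)
    st.1 ++ [(st.2.1, st.2.2)]

-- ===== PORT B =====
-- loop body of B: `rev` is kept newest-first (Python appends at the end and reverses once;
-- the Lean list conses at the front, so the final reverse is the identity of representation)
def pvStepB (rev : List (Int × Int)) (i : Int) : List (Int × Int) :=
  match rev with
  | (s, e) :: t => if s = i + 1 then (i, e) :: t else (i, i + 1) :: (s, e) :: t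
  | [] => [(i, i + 1)]

def compress_refs_py_alt (indices : List Int) : List (Int × Int) :=
  indices.reverse.foldl pvStepB []

-- ===== PRECONDITION & SPEC =====
def Spec_compress_refs_py (indices : List Int) (out : List (Int × Int)) : Prop := out = compress_refs_py_alt indices
instance (indices : List Int) (out : List (Int × Int)) : Decidable (Spec_compress_refs_py indices out) := by unfold Spec_compress_refs_py; infer_instance

-- ===== CLAIM (what is proved, stated in full; the proofs are below) =====
def Claim_equal_compress_refs_py : Prop := ∀ (indices : List Int), Dom_compress_refs_py indices → Spec_compress_refs_py indices (compress_refs_py indices)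

-- ===== LEMMAS AND PROOFS =====

-- A's loop finished from state (start = s, end_exclusive = e), with empty accumulated result
def pvAf (s e : Int) (l : List Int) : List (Int × Int) :=
  let st := l.foldl pvStepA ([], s, e)
  st.1 ++ [(st.2.1, st.2.2)]

-- B's fold written as a foldr (the backward scan)
def pvBf (l : List Int) : List (Int × Int) := l.foldr (fun i acc => pvStepB acc i) []

-- merge a pending range (s, e) into a newest-first range list
def pvExt (s e : Int) (acc : List (Int × Int)) : List (Int × Int) :=
  match acc with
  | (s', e') :: t => if s' = e then (s, e') :: t else (s, e) :: (s', e') :: t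
  | [] => [(s, e)]

theorem pvStepB_eq_ext (acc : List (Int × Int)) (i : Int) : pvStepB acc i = pvExt i (i + 1) acc := by
  rcases acc with _ | ⟨⟨s, e⟩, t⟩ <;> rfl

theorem pvBf_cons (i : Int) (l : List Int) : pvBf (i :: l) = pvExt i (i + 1) (pvBf l) := by
  simp [pvBf, pvStepB_eq_ext]

-- A's accumulated result factors out of the fold
theorem pvFoldA_factor (l : List Int) : ∀ (r : List (Int × Int)) (s e : Int),
    l.foldl pvStepA (r, s, e) =
      (r ++ (l.foldl pvStepA ([], s, e)).1, (l.foldl pvStepA ([], s, e)).2) := by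
  induction l with
  | nil => intro r s e; simp
  | cons i l ih =>
    intro r s e
    by_cases h : i = e
    · simp only [List.foldl_cons, pvStepA, if_pos h]
      exact ih r s (e + 1)
    · simp only [List.foldl_cons, pvStepA, if_neg h, List.nil_append]
      rw [ih (r ++ [(s, e)]), ih [(s, e)]]
      simp

theorem pvAf_cons (s e i : Int) (l : List Int) :
    pvAf s e (i :: l) = if i = e then pvAf s (e + 1) l else (s, e) :: pvAf i (i + 1) l := by
  by_cases h : i = e
  · simp [pvAf, pvStepA, h]
  · simp only [pvAf, List.foldl_cons, pvStepA, if_neg h, List.nil_append]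
    rw [pvFoldA_factor l [(s, e)]]
    simp

theorem pvExt_merge (s e : Int) (X : List (Int × Int)) :
    pvExt s e (pvExt e (e + 1) X) = pvExt s (e + 1) X := by
  rcases X with _ | ⟨⟨s', e'⟩, t⟩ <;> simp only [pvExt] <;> split_ifs <;> simp

theorem pvExt_cons (s e i : Int) (X : List (Int × Int)) (h : i ≠ e) :
    pvExt s e (pvExt i (i + 1) X) = (s, e) :: pvExt i (i + 1) X := by
  rcases X with _ | ⟨⟨s', e'⟩, t⟩
  · simp [pvExt, h]
  · simp only [pvExt]
    split_ifs with h2 <;> simp [h]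

theorem pvMain (l : List Int) : ∀ s e : Int, pvAf s e l = pvExt s e (pvBf l) := by
  induction l with
  | nil => intro s e; rfl
  | cons i l ih =>
    intro s e
    rw [pvAf_cons, pvBf_cons]
    by_cases h : i = e
    · subst h; rw [if_pos rfl, pvExt_merge, ih]
    · rw [if_neg h, pvExt_cons _ _ _ _ h, ih]

-- ===== VERDICT (by name: the statement is the Claim_ definition above) =====
theorem compress_refs_py_spec : Claim_equal_compress_refs_py := by
  intro indices _
  unfold Spec_compress_refs_py
  cases indices with
  | nil => rfl
  | cons x rest =>
    show pvAf x (x + 1) rest = compress_refs_py_alt (x :: rest)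
    rw [pvMain]
    simp only [compress_refs_py_alt, List.foldl_reverse]
    rw [show (x :: rest).foldr (fun x y => pvStepB y x) [] = pvBf (x :: rest) from rfl, pvBf_cons]
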